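-- pv_equiv track=rewrite | github.com/BloodWorkXGaming/WarframeRelicReader | warframe/Screenshot.py | check_valid_name
-- ===== SOURCE A (Python) =====
-- def strip_name(name: str) -> str:
--     cleaned = " "
--     last_char_space = True
--     name = name.replace("ı", "i").replace(" : ", ":")
--     has_colon = False
--
--     for c in name:
--         if not (c.isalpha() or c == ":" or c == " "):
--             continue
--         if c == ":" and has_colon:
--             continue
--         if c.isupper() and not last_char_space:
--             cleaned += " "
--
--         if c == ":":
--             has_colon = True
--         cleaned += c
--         last_char_space = c == " "
--
--     cleaned = cleaned.strip().replace("   ", " ").replace("  ", " ").strip()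
--
--     return cleaned
--
-- def check_valid_name(name: str) -> bool:
--     last_space = 0
--     for c in strip_name(name.strip()):
--         if c == " ":
--             if last_space < 2:
--                 return False
--             last_space = 0
--         else:
--             last_space += 1
--
--     return True
-- ===== SOURCE B (Python) =====
-- def check_valid_name(name: str) -> bool:
--     s = name.strip().replace("ı", "i").replace(" : ", ":")
--     # pass 1: keep letters, spaces, and the first colon only
--     kept = []
--     seen_colon = False
--     for c in s:
--         if c.isalpha() or c == " " or (c == ":" and not seen_colon):
--             kept.append(c)
--             seen_colon = seen_colon or c == ":"
--     # pass 2: insert a space before each uppercase letter preceded by a non-space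
--     parts = []
--     prev = " "
--     for c in kept:
--         parts.append(" " + c if (c.isupper() and prev != " ") else c)
--         prev = c
--     cleaned = "".join(parts).strip().replace("   ", " ").replace("  ", " ").strip()
--     # every word before the last must have at least 2 characters
--     words = cleaned.split(" ")
--     return all(len(w) >= 2 for w in words[:-1])
-- ===== Notes on version B (the rewrite author's own statement) =====
-- stated objective: simpler
-- what changed: A's single stateful fold (character filter, first-colon flag and camel-case space insertion in one loop state) plus a per-character running-length counter with early return is replaced by staged passes: filter the kept characters, insert a space before each uppercase letter following a non-space kept character, then split the cleaned string on spaces and check that every word except the last has length >= 2.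
import Mathlib
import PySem

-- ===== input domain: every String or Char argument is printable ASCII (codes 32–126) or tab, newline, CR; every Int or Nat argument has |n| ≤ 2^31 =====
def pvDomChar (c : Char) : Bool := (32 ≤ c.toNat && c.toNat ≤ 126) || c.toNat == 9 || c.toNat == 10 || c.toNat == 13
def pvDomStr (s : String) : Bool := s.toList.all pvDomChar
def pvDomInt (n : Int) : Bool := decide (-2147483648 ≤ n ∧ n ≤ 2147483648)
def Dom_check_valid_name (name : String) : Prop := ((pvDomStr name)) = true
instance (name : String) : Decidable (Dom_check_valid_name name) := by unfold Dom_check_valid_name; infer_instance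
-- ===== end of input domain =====

-- B replaces A's single stateful fold (filter + colon flag + camel-space insertion in one loop
-- state) and its running non-space counter with early return by STAGED PASSES: filter the kept
-- characters, then insert a space before each uppercase letter that follows a non-space kept
-- character, then check the lengths of the split words (objective: simpler decomposition).

-- ===== PORT A =====
-- A's loop body: state = (cleaned, last_char_space, has_colon)
def stepA (st : List Char × Bool × Bool) (c : Char) : List Char × Bool × Bool :=
  let cleaned := st.1
  let last_char_space := st.2.1
  let has_colon := st.2.2
  if !(PySem.Chars.isalpha c || c == ':' || c == ' ') then st
  else if c == ':' && has_colon then st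
  else
    let cleaned := if PySem.Chars.isupper c && !last_char_space then cleaned ++ [' '] else cleaned
    let has_colon := if c == ':' then true else has_colon
    (cleaned ++ [c], c == ' ', has_colon)

-- Python strip_name, over List Char
def stripNameChars (name : List Char) : List Char :=
  let name := PySem.Chars.replace (PySem.Chars.replace name ['ı'] ['i']) [' ', ':', ' '] [':']
  let st := name.foldl stepA ([' '], true, false)
  PySem.Chars.strip (PySem.Chars.replace (PySem.Chars.replace (PySem.Chars.strip st.1) [' ', ' ', ' '] [' ']) [' ', ' '] [' '])

-- A's for-loop with its early return: last is the running non-space count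
def checkLoopA : List Char → Int → Bool
  | [], _ => true
  | c :: rest, last =>
    if c == ' ' then
      if last < 2 then false else checkLoopA rest 0
    else checkLoopA rest (last + 1)

def check_valid_name (name : String) : Bool :=
  checkLoopA (stripNameChars (PySem.Chars.strip name.toList)) 0

-- ===== PORT B =====
-- pass 1: keep letters, spaces, and the first colon only
def keepChars : List Char → Bool → List Char
  | [], _ => []
  | c :: rest, seen =>
    if PySem.Chars.isalpha c || c == ' ' || (c == ':' && !seen) then
      c :: keepChars rest (seen || c == ':')
    else
      keepChars rest seen

-- pass 2: emit a space before each uppercase letter preceded by a non-space kept character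
def camelSplit : Char → List Char → List Char
  | _, [] => []
  | prev, c :: rest =>
    (if PySem.Chars.isupper c && prev != ' ' then [' ', c] else [c]) ++ camelSplit c rest

def check_valid_name_alt (name : String) : Bool :=
  let s := PySem.Chars.replace (PySem.Chars.replace (PySem.Chars.strip name.toList) ['ı'] ['i']) [' ', ':', ' '] [':']
  let kept := keepChars s false
  let cleaned := PySem.Chars.strip (PySem.Chars.replace (PySem.Chars.replace (PySem.Chars.strip (camelSplit ' ' kept)) [' ', ' ', ' '] [' ']) [' ', ' '] [' '])
  (cleaned.splitOn ' ').dropLast.all (fun w => decide (2 ≤ w.length))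

-- ===== PRECONDITION & SPEC =====
def Spec_check_valid_name (name : String) (out : Bool) : Prop := out = check_valid_name_alt name
instance (name : String) (out : Bool) : Decidable (Spec_check_valid_name name out) := by unfold Spec_check_valid_name; infer_instance

-- ===== CLAIM (what is proved, stated in full; the proofs are below) =====
def Claim_equal_check_valid_name : Prop := ∀ (name : String), Dom_check_valid_name name → Spec_check_valid_name name (check_valid_name name)

-- ===== LEMMAS AND PROOFS =====

-- A's fold builds: accumulator so far ++ camel-split of the filtered remainder,
-- where p stands for the last kept character (last_char_space = (p == ' '))
theorem foldA_stage (l : List Char) : ∀ (acc : List Char) (p : Char) (hc : Bool),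
    (l.foldl stepA (acc, p == ' ', hc)).1 = acc ++ camelSplit p (keepChars l hc) := by
  induction l with
  | nil => intro acc p hc; simp [camelSplit, keepChars]
  | cons c rest ih =>
    intro acc p hc
    simp only [List.foldl_cons]
    by_cases h2 : c = ':' ∧ hc = true
    · obtain ⟨rfl, rfl⟩ := h2
      have hs : stepA (acc, p == ' ', true) ':' = (acc, p == ' ', true) := by
        simp [stepA]
      rw [hs, ih acc p true]
      simp [keepChars, show PySem.Chars.isalpha ':' = false from by decide]
    · by_cases h1 : (PySem.Chars.isalpha c || c == ':' || c == ' ') = true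
      · -- kept character
        have hcc : (c == ':' && hc) = false := by
          rcases hκ : (c == ':') with _ | _
          · simp
          · have : c = ':' := by simpa using hκ
            rcases hhc : hc with _ | _
            · simp
            · exact absurd ⟨this, hhc⟩ h2
        have hs : stepA (acc, p == ' ', hc) c =
            ((if PySem.Chars.isupper c && !(p == ' ') then acc ++ [' '] else acc) ++ [c],
              c == ' ', if c == ':' then true else hc) := by
          simp [stepA, h1, hcc]
        have hk : keepChars (c :: rest) hc = c :: keepChars rest (hc || (c == ':')) := by
          have hcond : (PySem.Chars.isalpha c || c == ' ' || (c == ':' && !hc)) = true := by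
            rcases hκ : (c == ':') with _ | _
            · rcases (Bool.or_eq_true ..).mp h1 with h | h
              · rcases (Bool.or_eq_true ..).mp h with h | h
                · simp [h]
                · rw [hκ] at h; exact absurd h (by simp)
              · simp [h]
            · have hhc : hc = false := by
                rcases hhc : hc with _ | _
                · rfl
                · exact absurd ⟨by simpa using hκ, hhc⟩ h2
              simp [hhc]
          simp [keepChars, hcond]
        rw [hs, hk]
        have hc' : (if c == ':' then true else hc) = (hc || (c == ':')) := by
          rcases (c == ':') with _ | _ <;> simp
        rw [hc', ih _ c (hc || (c == ':'))]
        rcases hu : (PySem.Chars.isupper c && !(p == ' ')) with _ | _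
        · have : (PySem.Chars.isupper c && p != ' ') = false := by simpa [bne] using hu
          simp [camelSplit, this]
        · have : (PySem.Chars.isupper c && p != ' ') = true := by simpa [bne] using hu
          simp [camelSplit, this]
      · -- skipped character
        have hs : stepA (acc, p == ' ', hc) c = (acc, p == ' ', hc) := by
          simp [stepA, h1]
        have hα : PySem.Chars.isalpha c = false := by
          rcases h : PySem.Chars.isalpha c with _ | _
          · rfl
          · exact absurd (by simp [h]) h1
        have hκ : (c == ':') = false := by
          rcases h : (c == ':') with _ | _
          · rfl
          · exact absurd (by simp [h]) h1
        have hσ : (c == ' ') = false := by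
          rcases h : (c == ' ') with _ | _
          · rfl
          · exact absurd (by simp [h]) h1
        rw [hs, ih acc p hc]
        simp [keepChars, hα, hκ, hσ]

-- a leading space never survives strip
theorem strip_space_cons (x : List Char) : PySem.Chars.strip (' ' :: x) = PySem.Chars.strip x := by
  simp [PySem.Chars.strip, PySem.Chars.lstrip, PySem.Chars.rstrip, PySem.Chars.isspace]

-- proof-only helper: word-length check where the FIRST word is offset by the counter k
def wordsOK (k : Nat) : List (List Char) → Bool
  | [] => true
  | w :: ws => decide (2 ≤ k + w.length) && ws.all (fun w => decide (2 ≤ w.length))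

theorem wordsOK_zero (ws : List (List Char)) :
    wordsOK 0 ws = ws.all (fun w => decide (2 ≤ w.length)) := by
  cases ws <;> simp [wordsOK]

-- A's running counter k is the length of the current word's already-seen prefix
theorem checkLoopA_eq_splitOn (l : List Char) : ∀ (k : Nat),
    checkLoopA l (k : Int) = wordsOK k ((l.splitOn ' ').dropLast) := by
  induction l with
  | nil =>
    intro k
    simp [checkLoopA, List.splitOn, List.splitOnP_nil, wordsOK]
  | cons c rest ih =>
    intro k
    by_cases hc : c = ' '
    · subst hc
      have h1 : checkLoopA (' ' :: rest) (k : Int)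
          = if (k : Int) < 2 then false else checkLoopA rest 0 := by
        simp [checkLoopA]
      have h2 : ((' ' :: rest).splitOn ' ') = [] :: rest.splitOn ' ' := by
        simp [List.splitOn, List.splitOnP_cons]
      rcases hsp : rest.splitOn ' ' with _ | ⟨w, ws⟩
      · exact absurd hsp (List.splitOnP_ne_nil _ _)
      · have hall : checkLoopA rest 0 = ((w :: ws).dropLast).all (fun w => decide (2 ≤ w.length)) := by
          have := ih 0
          rw [hsp] at this
          simpa [wordsOK_zero] using this
        rw [h1, h2, hsp]
        have hdl : (([] : List Char) :: w :: ws).dropLast = [] :: (w :: ws).dropLast :=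
          List.dropLast_cons₂ ..
        rw [hdl]
        by_cases hk : k < 2
        · have hki : (k : Int) < 2 := by exact_mod_cast hk
          have hnk : ¬ 2 ≤ k := by omega
          simp [hki, wordsOK, hnk]
        · have hki : ¬ (k : Int) < 2 := by exact_mod_cast hk
          simp [hki, wordsOK, Nat.le_of_not_lt hk, hall]
    · have h1 : checkLoopA (c :: rest) (k : Int) = checkLoopA rest ((k : Int) + 1) := by
        simp [checkLoopA, hc]
      have hcast : ((k : Int) + 1) = ((k + 1 : Nat) : Int) := by push_cast; ring
      have h2 : ((c :: rest).splitOn ' ') = (rest.splitOn ' ').modifyHead (c :: ·) := by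
        simp [List.splitOn, List.splitOnP_cons, hc]
      rw [h1, hcast, ih (k + 1), h2]
      rcases hsp : rest.splitOn ' ' with _ | ⟨w, ws⟩
      · exact absurd hsp (List.splitOnP_ne_nil _ _)
      · rcases ws with _ | ⟨w', ws'⟩
        · simp [wordsOK]
        · simp only [List.modifyHead, List.dropLast_cons₂, wordsOK, List.length_cons]
          congr 1
          exact decide_eq_decide.mpr (by omega)

-- ===== VERDICT (by name: the statement is the Claim_ definition above) =====
theorem check_valid_name_spec : Claim_equal_check_valid_name := by
  intro name _
  unfold Spec_check_valid_name check_valid_name check_valid_name_alt stripNameChars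
  simp only []
  have hst : (List.foldl stepA ([' '], true, false)
      (PySem.Chars.replace (PySem.Chars.replace (PySem.Chars.strip name.toList) ['ı'] ['i']) [' ', ':', ' '] [':'])).1
      = ' ' :: camelSplit ' '
          (keepChars (PySem.Chars.replace (PySem.Chars.replace (PySem.Chars.strip name.toList) ['ı'] ['i']) [' ', ':', ' '] [':']) false) := by
    simpa using foldA_stage
      (PySem.Chars.replace (PySem.Chars.replace (PySem.Chars.strip name.toList) ['ı'] ['i']) [' ', ':', ' '] [':'])
      [' '] ' ' false
  rw [hst, strip_space_cons]
  rw [show ((0 : Int)) = ((0 : Nat) : Int) from rfl, checkLoopA_eq_splitOn, wordsOK_zero]
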